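-- pv_equiv track=rewrite | github.com/Nenakhov-Karim/UN_Prod | tokenization.py | search_entities_in_text
-- ===== SOURCE A (Python) =====
-- def search_entities_in_text(normalized_text, expanded_entity_map, original_entity_map, original_text):
--     max_iterations = 1000
--     tokens = []
--
--     for entity_type, entity_list in expanded_entity_map.items():
--         for entity in entity_list:
--             if not entity.strip():
--                 continue
--
--             entity_lower = entity.lower()
--             text_lower = normalized_text.lower()
--             start_idx = 0
--             iterations = 0
--
--             while iterations < max_iterations:
--                 iterations += 1
--                 pos = text_lower.find(entity_lower, start_idx)
--                 if pos == -1: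
--                     break
--                 is_start = pos == 0 or not text_lower[pos - 1].isalnum()
--                 is_end = pos + len(entity_lower) == len(text_lower) or not text_lower[pos + len(entity_lower)].isalnum()
--
--                 if is_start and is_end:
--                     tokens.append((original_text[pos:pos + len(entity)], entity_type, pos))
--
--                 start_idx = pos + 1
--     return tokens
-- ===== SOURCE B (Python) =====
-- def search_entities_in_text(normalized_text, expanded_entity_map, original_entity_map, original_text):
--     max_occurrences = 1000
--     text_lower = normalized_text.lower()
--     n = len(text_lower)
--
--     def boundary_positions(pattern):
--         # first up to max_occurrences overlapping occurrence starts ...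
--         positions = []
--         start = 0
--         while len(positions) < max_occurrences:
--             pos = text_lower.find(pattern, start)
--             if pos == -1:
--                 break
--             positions.append(pos)
--             start = pos + 1
--         # ... kept only where flanked by non-alphanumerics (or the text ends)
--         m = len(pattern)
--         return [p for p in positions
--                 if (p == 0 or not text_lower[p - 1].isalnum())
--                 and (p + m == n or not text_lower[p + m].isalnum())]
--
--     # occurrence table computed once per distinct lowercased pattern
--     patterns = {e.lower() for lst in expanded_entity_map.values()
--                 for e in lst if e.strip()}
--     table = {p: boundary_positions(p) for p in patterns}
--
--     tokens = []
--     for entity_type, entity_list in expanded_entity_map.items():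
--         for entity in entity_list:
--             if not entity.strip():
--                 continue
--             tokens.extend((original_text[p:p + len(entity)], entity_type, p)
--                           for p in table[entity.lower()])
--     return tokens
-- ===== Notes on version B (the rewrite author's own statement) =====
-- stated objective: faster
-- what changed: B lowers the text once and precomputes, per DISTINCT lowercased entity, the boundary-valid occurrence positions into a table (collect occurrences, then filter boundaries), then assembles the token list from table lookups, instead of A's per-entity loop that re-lowers the whole text and interleaves find, boundary test and append.
import Mathlib
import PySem

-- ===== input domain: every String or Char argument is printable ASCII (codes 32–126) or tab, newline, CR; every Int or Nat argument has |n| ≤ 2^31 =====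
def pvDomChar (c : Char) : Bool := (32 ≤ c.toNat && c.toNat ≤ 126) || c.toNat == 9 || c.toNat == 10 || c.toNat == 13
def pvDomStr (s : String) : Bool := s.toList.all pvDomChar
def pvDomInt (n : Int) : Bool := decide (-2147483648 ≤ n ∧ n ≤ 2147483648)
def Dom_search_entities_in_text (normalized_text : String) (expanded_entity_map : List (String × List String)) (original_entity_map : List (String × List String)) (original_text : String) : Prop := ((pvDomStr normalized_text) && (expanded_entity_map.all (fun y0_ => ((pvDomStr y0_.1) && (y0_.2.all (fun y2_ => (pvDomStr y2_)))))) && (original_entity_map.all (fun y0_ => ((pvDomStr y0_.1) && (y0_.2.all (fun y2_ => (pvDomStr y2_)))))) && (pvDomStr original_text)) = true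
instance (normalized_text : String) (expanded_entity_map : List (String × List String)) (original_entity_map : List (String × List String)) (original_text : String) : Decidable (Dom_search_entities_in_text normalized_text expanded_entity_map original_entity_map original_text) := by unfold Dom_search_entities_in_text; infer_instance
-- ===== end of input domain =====

-- B lowers the text once, computes the boundary-valid occurrence positions once per DISTINCT
-- lowercased entity into a table (collect-then-filter), then assembles the token list from the
-- table — versus A's per-entity interleaved find/test loop; constant-factor faster.

-- ===== PORT A =====
-- A's inner `while iterations < 1000` loop: state (fuel, start_idx, tokens);
-- `text_lower[pos-1]` / `[pos+len]` are only reached in range (short-circuit `or`), so pyGetD is exact.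
def pvFindLoopA (tl el : List Char) (entity et ot : String) : Nat → Int → List (String × String × Int) → List (String × String × Int)
  | 0, _, toks => toks
  | fuel+1, start_idx, toks =>
    let pos := PySem.Chars.findFrom tl el start_idx
    if pos = -1 then toks
    else
      let is_start := (pos == 0) || !(PySem.Str.isalnum (PySem.List.pyGetD tl (pos - 1) ' '))
      let is_end := (pos + (el.length : Int) == (tl.length : Int)) || !(PySem.Str.isalnum (PySem.List.pyGetD tl (pos + (el.length : Int)) ' '))
      let toks' := if is_start && is_end then toks ++ [(PySem.Str.slice ot (some pos) (some (pos + (entity.toList.length : Int))), et, pos)] else toks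
      pvFindLoopA tl el entity et ot fuel (pos + 1) toks'

def search_entities_in_text (normalized_text : String) (expanded_entity_map : List (String × List String)) (original_entity_map : List (String × List String)) (original_text : String) : List (String × String × Int) :=
  expanded_entity_map.foldl (fun toks pr =>
    pr.2.foldl (fun toks entity =>
      if PySem.Chars.strip entity.toList = [] then toks
      else pvFindLoopA (PySem.Chars.lower normalized_text.toList) (PySem.Chars.lower entity.toList) entity pr.1 original_text 1000 0 toks) toks) []

-- ===== PORT B =====
-- Source B's inner `while len(positions) < 1000` loop: fuel = remaining capacity, consumed per append
def pvOccLoop (tl el : List Char) : Nat → Int → List Int → List Int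
  | 0, _, ps => ps
  | cap+1, start, ps =>
    let pos := PySem.Chars.findFrom tl el start
    if pos = -1 then ps
    else pvOccLoop tl el cap (pos + 1) (ps ++ [pos])

-- the comprehension condition of Source B's boundary filter
def pvBnd (tl el : List Char) (p : Int) : Bool :=
  ((p == 0) || !(PySem.Str.isalnum (PySem.List.pyGetD tl (p - 1) ' '))) &&
  ((p + (el.length : Int) == (tl.length : Int)) || !(PySem.Str.isalnum (PySem.List.pyGetD tl (p + (el.length : Int)) ' ')))

def pvBoundaryPositions (tl el : List Char) : List Int :=
  (pvOccLoop tl el 1000 0 []).filter (pvBnd tl el)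

-- one token of Source B's `tokens.extend(...)` generator
def pvTok (ot entity et : String) (p : Int) : String × String × Int :=
  (PySem.Str.slice ot (some p) (some (p + (entity.toList.length : Int))), et, p)

def search_entities_in_text_alt (normalized_text : String) (expanded_entity_map : List (String × List String)) (original_entity_map : List (String × List String)) (original_text : String) : List (String × String × Int) :=
  let tl := PySem.Chars.lower normalized_text.toList
  let patterns : List (List Char) := PySem.Set.ofList
    (expanded_entity_map.flatMap (fun pr =>
      (pr.2.filter (fun e => ¬ PySem.Chars.strip e.toList = [])).map (fun e => PySem.Chars.lower e.toList)))
  let table := PySem.Dict.ofList (patterns.map (fun p => (p, pvBoundaryPositions tl p)))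
  expanded_entity_map.foldl (fun toks pr =>
    pr.2.foldl (fun toks entity =>
      if PySem.Chars.strip entity.toList = [] then toks
      else toks ++ (table.getD (PySem.Chars.lower entity.toList) []).map (pvTok original_text entity pr.1)) toks) []

-- ===== PRECONDITION & SPEC =====
def Spec_search_entities_in_text (normalized_text : String) (expanded_entity_map : List (String × List String)) (original_entity_map : List (String × List String)) (original_text : String) (out : List (String × String × Int)) : Prop := out = search_entities_in_text_alt normalized_text expanded_entity_map original_entity_map original_text
instance (normalized_text : String) (expanded_entity_map : List (String × List String)) (original_entity_map : List (String × List String)) (original_text : String) (out : List (String × String × Int)) : Decidable (Spec_search_entities_in_text normalized_text expanded_entity_map original_entity_map original_text out) := by unfold Spec_search_entities_in_text; infer_instance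

-- ===== CLAIM (what is proved, stated in full; the proofs are below) =====
def Claim_equal_search_entities_in_text : Prop := ∀ (normalized_text : String) (expanded_entity_map : List (String × List String)) (original_entity_map : List (String × List String)) (original_text : String), Dom_search_entities_in_text normalized_text expanded_entity_map original_entity_map original_text → Spec_search_entities_in_text normalized_text expanded_entity_map original_entity_map original_text (search_entities_in_text normalized_text expanded_entity_map original_entity_map original_text)

-- ===== LEMMAS AND PROOFS =====

-- B's occurrence loop: the accumulator factors out
lemma pvOccLoop_acc (tl el : List Char) (cap : Nat) : ∀ (s : Int) (ps : List Int),
    pvOccLoop tl el cap s ps = ps ++ pvOccLoop tl el cap s [] := by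
  induction cap with
  | zero => intro s ps; simp [pvOccLoop]
  | succ n ih =>
    intro s ps
    simp only [pvOccLoop]
    by_cases h : PySem.Chars.findFrom tl el s = -1
    · simp [h]
    · simp only [h]
      rw [ih (PySem.Chars.findFrom tl el s + 1) (ps ++ [PySem.Chars.findFrom tl el s]),
          ih (PySem.Chars.findFrom tl el s + 1) ([] ++ [PySem.Chars.findFrom tl el s])]
      simp

-- A's interleaved loop = collect positions, filter boundaries, map to tokens
lemma pvFindLoopA_eq (tl el : List Char) (entity et ot : String) (fuel : Nat) :
    ∀ (start : Int) (toks : List (String × String × Int)),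
    pvFindLoopA tl el entity et ot fuel start toks
      = toks ++ ((pvOccLoop tl el fuel start []).filter (pvBnd tl el)).map (pvTok ot entity et) := by
  induction fuel with
  | zero => intro s toks; simp [pvFindLoopA, pvOccLoop]
  | succ n ih =>
    intro s toks
    simp only [pvFindLoopA, pvOccLoop]
    by_cases h : PySem.Chars.findFrom tl el s = -1
    · simp [h]
    · simp only [h]
      simp only [List.nil_append]
      rw [ih, pvOccLoop_acc tl el n (PySem.Chars.findFrom tl el s + 1) [PySem.Chars.findFrom tl el s]]
      have hbnd : (((PySem.Chars.findFrom tl el s == 0) || !(PySem.Str.isalnum (PySem.List.pyGetD tl (PySem.Chars.findFrom tl el s - 1) ' '))) &&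
          ((PySem.Chars.findFrom tl el s + (el.length : Int) == (tl.length : Int)) || !(PySem.Str.isalnum (PySem.List.pyGetD tl (PySem.Chars.findFrom tl el s + (el.length : Int)) ' '))))
          = pvBnd tl el (PySem.Chars.findFrom tl el s) := rfl
      rw [hbnd]
      by_cases hb : pvBnd tl el (PySem.Chars.findFrom tl el s) = true
      · simp [hb, pvTok]
      · simp [hb, pvTok]

-- the table built by B answers `pvBoundaryPositions` on every pattern it contains
lemma pvTable_getD (tl : List Char) (patterns : List (List Char)) (hnd : patterns.Nodup)
    {p : List Char} (hp : p ∈ patterns) :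
    (PySem.Dict.ofList (patterns.map (fun q => (q, pvBoundaryPositions tl q)))).getD p []
      = pvBoundaryPositions tl p := by
  have hitems : (PySem.Dict.ofList (patterns.map (fun q => (q, pvBoundaryPositions tl q)))).items
      = patterns.map (fun q => (q, pvBoundaryPositions tl q)) := by
    show (PySem.Dict.empty.update (patterns.map (fun q => (q, pvBoundaryPositions tl q)))).items = _
    unfold PySem.Dict.update
    rw [List.foldl_map]
    rw [PySem.Dict.items_foldl_insert_fresh patterns (fun q => q) (fun q => pvBoundaryPositions tl q)
        PySem.Dict.empty (fun a _ => PySem.Dict.contains_empty a) (by simpa using hnd)]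
    simp [PySem.Dict.empty]
  apply PySem.Dict.getD_of_mem_items
  · rw [hitems]
    exact List.mem_map.mpr ⟨p, hp, rfl⟩
  · show ((PySem.Dict.ofList _).items.map Prod.fst).Nodup
    rw [hitems]
    simpa [List.map_map, Function.comp_def] using hnd

-- ===== VERDICT (by name: the statement is the Claim_ definition above) =====
theorem search_entities_in_text_spec : Claim_equal_search_entities_in_text := by
  intro nt em om ot _
  unfold Spec_search_entities_in_text search_entities_in_text search_entities_in_text_alt
  apply PySem.List.foldl_congr_mem
  intro acc pr hpr
  apply PySem.List.foldl_congr_mem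
  intro acc' e he
  by_cases hs : PySem.Chars.strip e.toList = []
  · simp [hs]
  · simp only [if_neg hs]
    rw [pvFindLoopA_eq]
    congr 1
    rw [pvTable_getD (PySem.Chars.lower nt.toList) _ (PySem.Set.nodup_ofList _)]
    · rfl
    · rw [PySem.Set.mem_ofList]
      exact List.mem_flatMap.mpr ⟨pr, hpr,
        List.mem_map.mpr ⟨e, List.mem_filter.mpr ⟨he, by simpa using hs⟩, rfl⟩⟩
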